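-- pv_equiv track=rewrite | github.com/markiengo/marqbot | backend/unlocks.py | compute_chain_depths
-- ===== SOURCE A (Python) =====
-- def compute_chain_depths(
--     reverse_map: dict[str, list[str]],
-- ) -> dict[str, int]:
--     """
--     Compute the longest downstream prerequisite chain depth for every course.
--
--     A course with no downstream dependents has depth 0.
--     FINA 3001 -> FINA 4075 -> AIM 4410 -> AIM 4420 -> AIM 4430
--     gives FINA 3001 depth 4.
--
--     Computed once at data load. O(V+E) with memoization.
--     """
--     memo: dict[str, int] = {}
--     in_stack: set[str] = set()
--
--     def _depth(course: str) -> int: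
--         if course in memo:
--             return memo[course]
--         if course in in_stack:
--             return 0  # cycle guard
--         in_stack.add(course)
--         children = reverse_map.get(course, [])
--         result = (1 + max(_depth(c) for c in children)) if children else 0
--         in_stack.discard(course)
--         memo[course] = result
--         return result
--
--     for course in reverse_map:
--         _depth(course)
--
--     return memo
-- ===== SOURCE B (Python) =====
-- def compute_chain_depths(reverse_map):
--     """Iterative explicit-stack DFS (same memo/in_stack semantics, no recursion)."""
--     memo = {}
--     in_stack = set()
--     for course in reverse_map:
--         stack = [(course, False)]
--         while stack:
--             node, processed = stack.pop()
--             if processed: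
--                 children = reverse_map.get(node, [])
--                 result = (1 + max(memo.get(c, 0) for c in children)) if children else 0
--                 in_stack.discard(node)
--                 memo[node] = result
--             else:
--                 if node in memo or node in in_stack:
--                     continue
--                 in_stack.add(node)
--                 stack.append((node, True))
--                 for c in reversed(reverse_map.get(node, [])):
--                     stack.append((c, False))
--     return memo
-- ===== Notes on version B (the rewrite author's own statement) =====
-- stated objective: alternative
-- what changed: The recursive memoized _depth is replaced by an iterative explicit-stack DFS: a worklist of (node, processed) frames with the same memo and in_stack, testing in_stack at descent time and computing 1 + max(memo.get(c, 0)) on the exit pass.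
import Mathlib
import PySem

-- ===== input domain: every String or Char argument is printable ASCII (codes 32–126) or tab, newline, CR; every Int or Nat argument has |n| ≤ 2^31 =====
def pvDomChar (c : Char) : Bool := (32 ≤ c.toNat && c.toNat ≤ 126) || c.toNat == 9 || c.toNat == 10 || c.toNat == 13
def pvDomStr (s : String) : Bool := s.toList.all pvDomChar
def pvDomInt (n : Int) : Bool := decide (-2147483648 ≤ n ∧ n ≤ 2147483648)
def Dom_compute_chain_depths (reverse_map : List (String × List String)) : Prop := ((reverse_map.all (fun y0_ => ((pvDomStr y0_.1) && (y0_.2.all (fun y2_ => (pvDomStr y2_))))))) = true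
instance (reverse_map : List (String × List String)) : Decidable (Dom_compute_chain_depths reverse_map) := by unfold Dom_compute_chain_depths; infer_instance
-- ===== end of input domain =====

-- B replaces A's recursive memoized DFS by an explicit-stack iterative DFS (same memo /
-- in_stack semantics, including the cycle guard); objective: alternative decomposition, same cost.

-- ===== PORT A =====
-- _depth's recursion is ported with a fuel parameter; pvFuelA is proven sufficient below
-- (pvSE), so the fuel-0 sentinel is never reached on any input.
mutual
def pvDepthA (rm : PySem.Dict String (List String)) (fuel : Nat) (c : String)
    (memo : PySem.Dict String Int) (st : PySem.Set String) :
    Int × PySem.Dict String Int × PySem.Set String :=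
  match fuel with
  | 0 => (0, memo, st)
  | fuel' + 1 =>
    match memo.get? c with
    | some v => (v, memo, st)                          -- if course in memo
    | none =>
      if PySem.Set.contains st c then (0, memo, st)    -- cycle guard
      else
        let st1 := PySem.Set.add st c                  -- in_stack.add(course)
        match rm.getD c [] with                        -- reverse_map.get(course, [])
        | [] => (0, memo.insert c 0, PySem.Set.discard st1 c)
        | ch :: t =>                                   -- max over _depth of the children
          let r0 := pvDepthA rm fuel' ch memo st1
          let r := pvDepthListA rm fuel' t r0.1 r0.2.1 r0.2.2
          (1 + r.1, (r.2.1).insert c (1 + r.1), PySem.Set.discard r.2.2 c)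
  termination_by (fuel, 0)

def pvDepthListA (rm : PySem.Dict String (List String)) (fuel : Nat) (l : List String)
    (acc : Int) (memo : PySem.Dict String Int) (st : PySem.Set String) :
    Int × PySem.Dict String Int × PySem.Set String :=
  match l with
  | [] => (acc, memo, st)
  | ch :: t =>
    let r0 := pvDepthA rm fuel ch memo st
    pvDepthListA rm fuel t (max acc r0.1) r0.2.1 r0.2.2
  termination_by (fuel, l.length + 1)
end

def pvFuelA (rm : PySem.Dict String (List String)) : Nat :=
  (rm.keys ++ rm.values.flatten).length + 1

def compute_chain_depths (reverse_map : List (String × List String)) : List (String × Int) :=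
  let rm : PySem.Dict String (List String) := PySem.Dict.ofList reverse_map
  let r := rm.keys.foldl
    (fun (s : PySem.Dict String Int × PySem.Set String) course =>
      (pvDepthA rm (pvFuelA rm) course s.1 s.2).2)
    (PySem.Dict.empty, PySem.Set.empty)
  r.1.items

-- ===== PORT B =====
-- the while-loop is ported with a fuel parameter; pvFuelB is proven sufficient below
-- (pvStep), so the fuel-0 sentinel is never reached on any input.
def pvRunB (rm : PySem.Dict String (List String)) (fuel : Nat)
    (stack : List (String × Bool)) (memo : PySem.Dict String Int) (st : PySem.Set String) :
    PySem.Dict String Int × PySem.Set String :=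
  match fuel, stack with
  | _, [] => (memo, st)
  | 0, _ => (memo, st)
  | fuel' + 1, (node, processed) :: rest =>
    if processed then
      let result : Int :=
        match rm.getD node [] with
        | [] => 0
        | ch :: t => 1 + t.foldl (fun a ch' => max a (memo.getD ch' 0)) (memo.getD ch 0)
      pvRunB rm fuel' rest (memo.insert node result) (PySem.Set.discard st node)
    else
      if memo.contains node || PySem.Set.contains st node then
        pvRunB rm fuel' rest memo st
      else
        pvRunB rm fuel' (((rm.getD node []).map (fun ch => (ch, false))) ++ (node, true) :: rest)
          memo (PySem.Set.add st node)

def pvFuelB (rm : PySem.Dict String (List String)) : Nat :=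
  (rm.keys ++ rm.values.flatten).foldl (fun a u => a + ((rm.getD u []).length + 2)) 0 + 1

def compute_chain_depths_alt (reverse_map : List (String × List String)) : List (String × Int) :=
  let rm : PySem.Dict String (List String) := PySem.Dict.ofList reverse_map
  let r := rm.keys.foldl
    (fun (s : PySem.Dict String Int × PySem.Set String) course =>
      pvRunB rm (pvFuelB rm) [(course, false)] s.1 s.2)
    (PySem.Dict.empty, PySem.Set.empty)
  r.1.items

-- ===== PRECONDITION & SPEC =====
def Spec_compute_chain_depths (reverse_map : List (String × List String)) (out : List (String × Int)) : Prop := out = compute_chain_depths_alt reverse_map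
instance (reverse_map : List (String × List String)) (out : List (String × Int)) : Decidable (Spec_compute_chain_depths reverse_map out) := by unfold Spec_compute_chain_depths; infer_instance

-- ===== CLAIM (what is proved, stated in full; the proofs are below) =====
def Claim_equal_compute_chain_depths : Prop := ∀ (reverse_map : List (String × List String)), Dom_compute_chain_depths reverse_map → Spec_compute_chain_depths reverse_map (compute_chain_depths reverse_map)

-- ===== LEMMAS AND PROOFS =====

-- all strings that can ever enter memo / in_stack, deduplicated
def pvUD (rm : PySem.Dict String (List String)) : List String :=
  PySem.List.dedup (rm.keys ++ rm.values.flatten)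

-- number of strings of pvUD not yet on the stack (recursion-depth measure)
def pvCnt (rm : PySem.Dict String (List String)) (st : PySem.Set String) : Nat :=
  ((pvUD rm).filter (fun x => !PySem.Set.contains st x)).length

-- potential: total machine work still available given the current memo
def pvPhi (rm : PySem.Dict String (List String)) (memo : PySem.Dict String Int) : Nat :=
  (((pvUD rm).filter (fun u => (memo.get? u).isNone)).map
      (fun u => (rm.getD u []).length + 2)).sum

-- number of machine steps the simulation of pvDepthA takes
mutual
def pvCostA (rm : PySem.Dict String (List String)) (fuel : Nat) (c : String)
    (memo : PySem.Dict String Int) (st : PySem.Set String) : Nat :=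
  match fuel with
  | 0 => 0
  | fuel' + 1 =>
    match memo.get? c with
    | some _ => 1
    | none =>
      if PySem.Set.contains st c then 1
      else
        let st1 := PySem.Set.add st c
        match rm.getD c [] with
        | [] => 2
        | ch :: t =>
          let r0 := pvDepthA rm fuel' ch memo st1
          2 + pvCostA rm fuel' ch memo st1 + pvCostListA rm fuel' t r0.2.1 r0.2.2
  termination_by (fuel, 0)

def pvCostListA (rm : PySem.Dict String (List String)) (fuel : Nat) (l : List String)
    (memo : PySem.Dict String Int) (st : PySem.Set String) : Nat :=
  match l with
  | [] => 0
  | ch :: t =>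
    let r0 := pvDepthA rm fuel ch memo st
    pvCostA rm fuel ch memo st + pvCostListA rm fuel t r0.2.1 r0.2.2
  termination_by (fuel, l.length + 1)
end

-- ---- small Set/Dict facts ----
theorem pvContainsEmpty (x : String) :
    PySem.Set.contains (PySem.Set.empty : PySem.Set String) x = false := by
  simp [PySem.Set.empty, PySem.Set.contains]

theorem pvContainsIff (st : PySem.Set String) (c : String) :
    PySem.Set.contains st c = true ↔ c ∈ st := by
  simp [PySem.Set.contains]

theorem pvNotMem {st : PySem.Set String} {c : String}
    (h : PySem.Set.contains st c = false) : c ∉ st := by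
  intro hc
  rw [← pvContainsIff] at hc
  rw [h] at hc
  cases hc

theorem pvMemContains {st : PySem.Set String} {c : String} (h : c ∈ st) :
    PySem.Set.contains st c = true := (pvContainsIff st c).mpr h

theorem pvContainsAdd (st : PySem.Set String) (c x : String) :
    PySem.Set.contains (PySem.Set.add st c) x = true ↔ (x ∈ st ∨ x = c) := by
  rw [pvContainsIff, PySem.Set.mem_add]

theorem pvDiscardAdd {st : PySem.Set String} {c : String}
    (h : PySem.Set.contains st c = false) :
    PySem.Set.discard (PySem.Set.add st c) c = st := by
  have hc : c ∉ st := pvNotMem h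
  rw [PySem.Set.add_of_not_mem hc]
  have hall : ∀ y ∈ st, (!(y == c)) = true := by
    intro y hy
    simp only [Bool.not_eq_true', beq_eq_false_iff_ne]
    exact fun e => hc (e ▸ hy)
  simp [PySem.Set.discard, List.filter_append, List.filter_eq_self.mpr hall]

theorem pvDedupSublist (xs : List String) : (PySem.List.dedup xs).Sublist xs := by
  induction xs with
  | nil => simp [PySem.List.dedup]
  | cons x t ih =>
    rw [PySem.List.dedup_eq_ofList] at *
    rw [PySem.Set.ofList_cons]
    exact List.Sublist.cons₂ x ((List.filter_sublist).trans ih)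

theorem pvUDNodup (rm : PySem.Dict String (List String)) : (pvUD rm).Nodup :=
  PySem.List.nodup_dedup _

theorem pvKeyMem {rm : PySem.Dict String (List String)} {c : String}
    (h : c ∈ rm.keys) : c ∈ pvUD rm := by
  unfold pvUD
  simp
  exact Or.inl h

theorem pvChildMem {rm : PySem.Dict String (List String)} {c ch : String}
    (h : ch ∈ rm.getD c []) : ch ∈ pvUD rm := by
  rw [PySem.Dict.getD_eq_get?_getD] at h
  cases hg : rm.get? c with
  | none => rw [hg] at h; simp at h
  | some l =>
    rw [hg] at h
    simp only [Option.getD_some] at h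
    have hi : (c, l) ∈ rm.items := PySem.Dict.mem_items_of_get?_eq_some _ hg
    have hv : l ∈ rm.values := by
      simp only [PySem.Dict.values]
      exact List.mem_map.mpr ⟨(c, l), hi, rfl⟩
    unfold pvUD
    simp
    exact Or.inr ⟨l, hv, h⟩

-- ---- L1: in_stack is restored by every call ----
theorem pvL1 (rm : PySem.Dict String (List String)) :
    ∀ fuel c memo st, (pvDepthA rm fuel c memo st).2.2 = st := by
  intro fuel
  induction fuel with
  | zero => intro c memo st; simp [pvDepthA]
  | succ f ih =>
    have ih' : ∀ (l : List String) acc memo st,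
        (pvDepthListA rm f l acc memo st).2.2 = st := by
      intro l
      induction l with
      | nil => intro acc memo st; simp [pvDepthListA]
      | cons ch t iht =>
        intro acc memo st
        simp only [pvDepthListA]
        rw [iht, ih]
    intro c memo st
    simp only [pvDepthA]
    cases hm : memo.get? c with
    | some v => simp
    | none =>
      simp only
      cases hst : PySem.Set.contains st c with
      | true => simp [hst]
      | false =>
        simp only [hst, Bool.false_eq_true, if_false]
        cases hch : rm.getD c [] with
        | nil => simp [pvDiscardAdd hst]
        | cons ch t =>
          simp only
          rw [ih', ih, pvDiscardAdd hst]

-- ---- L2: memo entries of keys on the stack are never touched ----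
theorem pvL2 (rm : PySem.Dict String (List String)) :
    ∀ fuel c memo st x, PySem.Set.contains st x = true →
      ((pvDepthA rm fuel c memo st).2.1).get? x = memo.get? x := by
  intro fuel
  induction fuel with
  | zero => intro c memo st x _; simp [pvDepthA]
  | succ f ih =>
    have ih' : ∀ (l : List String) acc memo st x, PySem.Set.contains st x = true →
        ((pvDepthListA rm f l acc memo st).2.1).get? x = memo.get? x := by
      intro l
      induction l with
      | nil => intro acc memo st x _; simp [pvDepthListA]
      | cons ch t iht =>
        intro acc memo st x hx
        simp only [pvDepthListA]
        rw [pvL1, iht _ _ _ _ hx, ih _ _ _ _ hx]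
    intro c memo st x hx
    simp only [pvDepthA]
    cases hm : memo.get? c with
    | some v => simp [hm]
    | none =>
      simp only
      cases hst : PySem.Set.contains st c with
      | true => simp [hst]
      | false =>
        simp only [hst, Bool.false_eq_true, if_false]
        have hxc : x ≠ c := by
          intro e; rw [e] at hx; rw [hx] at hst; cases hst
        have hx1 : PySem.Set.contains (PySem.Set.add st c) x = true :=
          (pvContainsAdd st c x).mpr (Or.inl ((pvContainsIff st x).mp hx))
        cases hch : rm.getD c [] with
        | nil =>
          simp only
          exact PySem.Dict.get?_insert_of_ne _ _ hxc
        | cons ch t =>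
          simp only
          rw [pvL1]
          rw [PySem.Dict.get?_insert_of_ne _ _ hxc]
          rw [ih' _ _ _ _ _ hx1, ih _ _ _ _ hx1]

theorem pvDLAget2 (rm : PySem.Dict String (List String)) (fuel : Nat) :
    ∀ (l : List String) acc memo st x, PySem.Set.contains st x = true →
      ((pvDepthListA rm fuel l acc memo st).2.1).get? x = memo.get? x := by
  intro l
  induction l with
  | nil => intro acc memo st x _; simp [pvDepthListA]
  | cons ch t iht =>
    intro acc memo st x hx
    simp only [pvDepthListA]
    rw [pvL1, iht _ _ _ _ hx, pvL2 _ _ _ _ _ _ hx]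

-- ---- L3: memo is monotone (existing entries survive) ----
theorem pvL3 (rm : PySem.Dict String (List String)) :
    ∀ fuel c memo st x v, memo.get? x = some v →
      ((pvDepthA rm fuel c memo st).2.1).get? x = some v := by
  intro fuel
  induction fuel with
  | zero => intro c memo st x v h; simpa [pvDepthA] using h
  | succ f ih =>
    have ih' : ∀ (l : List String) acc memo st x v, memo.get? x = some v →
        ((pvDepthListA rm f l acc memo st).2.1).get? x = some v := by
      intro l
      induction l with
      | nil => intro acc memo st x v h; simpa [pvDepthListA] using h
      | cons ch t iht =>
        intro acc memo st x v h
        simp only [pvDepthListA]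
        rw [pvL1]
        exact iht _ _ _ _ _ (ih _ _ _ _ _ h)
    intro c memo st x v h
    simp only [pvDepthA]
    cases hm : memo.get? c with
    | some w => simpa using h
    | none =>
      simp only
      cases hst : PySem.Set.contains st c with
      | true => simpa [hst] using h
      | false =>
        simp only [hst, Bool.false_eq_true, if_false]
        have hxc : x ≠ c := by
          intro e; rw [e, hm] at h; cases h
        cases hch : rm.getD c [] with
        | nil =>
          simp only
          rw [PySem.Dict.get?_insert_of_ne _ _ hxc]
          exact h
        | cons ch t =>
          simp only
          rw [pvL1]
          rw [PySem.Dict.get?_insert_of_ne _ _ hxc]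
          exact ih' _ _ _ _ _ _ (ih _ _ _ _ _ h)

theorem pvDLAget3 (rm : PySem.Dict String (List String)) (fuel : Nat) :
    ∀ (l : List String) acc memo st x v, memo.get? x = some v →
      ((pvDepthListA rm fuel l acc memo st).2.1).get? x = some v := by
  intro l
  induction l with
  | nil => intro acc memo st x v h; simpa [pvDepthListA] using h
  | cons ch t iht =>
    intro acc memo st x v h
    simp only [pvDepthListA]
    rw [pvL1]
    exact iht _ _ _ _ _ (pvL3 _ _ _ _ _ _ _ h)

-- ---- potential lemmas ----
theorem pvPhiInsertAux (memo : PySem.Dict String Int) (c : String) (v : Int)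
    (g : String → Nat) (hnone : memo.get? c = none) :
    ∀ l : List String, l.Nodup → c ∈ l →
      ((l.filter (fun u => ((memo.insert c v).get? u).isNone)).map g).sum + g c
        = ((l.filter (fun u => (memo.get? u).isNone)).map g).sum := by
  intro l
  induction l with
  | nil => intro _ h; cases h
  | cons a t ih =>
    intro hnd hc
    rcases List.mem_cons.mp hc with heq | hct
    · subst heq
      have hcnt : c ∉ t := (List.nodup_cons.mp hnd).1
      have h3 : t.filter (fun u => ((memo.insert c v).get? u).isNone)
          = t.filter (fun u => (memo.get? u).isNone) := by
        apply List.filter_congr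
        intro x hx
        rw [PySem.Dict.get?_insert_of_ne _ _ (fun e => hcnt (by rw [← e]; exact hx))]
      have h1 : ((memo.insert c v).get? c).isNone = false := by
        rw [PySem.Dict.get?_insert_self]; rfl
      have h2 : (memo.get? c).isNone = true := by rw [hnone]; rfl
      rw [List.filter_cons, List.filter_cons, h1, h2]
      simp only [Bool.false_eq_true, if_false, if_true, List.map_cons, List.sum_cons]
      rw [h3]
      omega
    · have hac : a ≠ c := by
        rintro rfl; exact (List.nodup_cons.mp hnd).1 hct
      have hsame : ((memo.insert c v).get? a).isNone = (memo.get? a).isNone := by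
        rw [PySem.Dict.get?_insert_of_ne _ _ hac]
      have ihh := ih (List.nodup_cons.mp hnd).2 hct
      cases hb : (memo.get? a).isNone with
      | false => simpa [List.filter_cons, hsame, hb] using ihh
      | true =>
        simp only [List.filter_cons, hsame, hb, if_true, List.map_cons, List.sum_cons]
        omega

theorem pvPhiInsert (rm : PySem.Dict String (List String)) (memo : PySem.Dict String Int)
    (c : String) (v : Int) (hc : c ∈ pvUD rm) (hnone : memo.get? c = none) :
    pvPhi rm (memo.insert c v) + ((rm.getD c []).length + 2) = pvPhi rm memo := by
  unfold pvPhi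
  exact pvPhiInsertAux memo c v _ hnone (pvUD rm) (pvUDNodup rm) hc

theorem pvPhiMono (rm : PySem.Dict String (List String))
    {memo memo' : PySem.Dict String Int}
    (h : ∀ x v, memo.get? x = some v → memo'.get? x = some v) :
    pvPhi rm memo' ≤ pvPhi rm memo := by
  unfold pvPhi
  have himp : ∀ u, (fun u => ((memo'.get? u).isNone)) u → (fun u => ((memo.get? u).isNone)) u := by
    intro u hu
    simp only at hu ⊢
    cases hg : memo.get? u with
    | none => simp
    | some v => rw [h u v hg] at hu; cases hu
  have hsub := List.monotone_filter_right (pvUD rm) himp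
  exact (hsub.map _).sum_le_sum (by simp)

-- ---- counting lemmas ----
theorem pvFilterLe {α : Type} (p q : α → Bool) :
    ∀ l : List α, (∀ x ∈ l, p x = true → q x = true) →
      (l.filter p).length ≤ (l.filter q).length := by
  intro l
  induction l with
  | nil => simp
  | cons a t ih =>
    intro h
    have iht := ih (fun x hx hpx => h x (List.mem_cons_of_mem a hx) hpx)
    simp only [List.filter_cons]
    cases hp : p a with
    | false => cases hq : q a <;> simp <;> omega
    | true =>
      rw [h a (List.mem_cons_self) hp]
      simpa using iht

theorem pvFilterLt {α : Type} (p q : α → Bool) :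
    ∀ l : List α, (∀ x ∈ l, p x = true → q x = true) →
      ∀ c ∈ l, q c = true → p c = false →
        (l.filter p).length < (l.filter q).length := by
  intro l
  induction l with
  | nil => intro _ c hc; cases hc
  | cons a t ih =>
    intro h c hc hq hp
    have ht : ∀ x ∈ t, p x = true → q x = true :=
      fun x hx hpx => h x (List.mem_cons_of_mem a hx) hpx
    rcases List.mem_cons.mp hc with rfl | hct
    · simp only [List.filter_cons, hp, hq, if_true, Bool.false_eq_true, if_false]
      have := pvFilterLe p q t ht
      simp only [List.length_cons]
      omega
    · have hlt := ih ht c hct hq hp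
      simp only [List.filter_cons]
      cases hpa : p a with
      | false => cases hqa : q a <;> simp <;> omega
      | true =>
        rw [h a (List.mem_cons_self) hpa]
        simpa using hlt

theorem pvCntAdd (rm : PySem.Dict String (List String)) {st : PySem.Set String} {c : String}
    (hc : c ∈ pvUD rm) (hst : PySem.Set.contains st c = false) :
    pvCnt rm (PySem.Set.add st c) < pvCnt rm st := by
  unfold pvCnt
  apply pvFilterLt _ _ (pvUD rm) ?_ c hc ?_ ?_
  · intro x _ hpx
    simp only [Bool.not_eq_true'] at hpx ⊢
    cases hqx : PySem.Set.contains st x with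
    | false => rfl
    | true =>
      have : PySem.Set.contains (PySem.Set.add st c) x = true :=
        (pvContainsAdd st c x).mpr (Or.inl ((pvContainsIff st x).mp hqx))
      rw [this] at hpx; cases hpx
  · rw [hst]; rfl
  · rw [(pvContainsAdd st c c).mpr (Or.inr rfl)]; rfl

-- ---- cost bound: pvCostA never exceeds 1 + the potential ----
theorem pvCBe (rm : PySem.Dict String (List String)) :
    ∀ fuel c memo st, c ∈ pvUD rm →
      pvCostA rm fuel c memo st + pvPhi rm (pvDepthA rm fuel c memo st).2.1
        ≤ 1 + pvPhi rm memo := by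
  intro fuel
  induction fuel with
  | zero => intro c memo st _; simp [pvCostA, pvDepthA]
  | succ f ih =>
    have ihl : ∀ (l : List String) (acc : Int) memo st, (∀ ch ∈ l, ch ∈ pvUD rm) →
        pvCostListA rm f l memo st + pvPhi rm (pvDepthListA rm f l acc memo st).2.1
          ≤ l.length + pvPhi rm memo := by
      intro l
      induction l with
      | nil => intro acc memo st _; simp [pvCostListA, pvDepthListA]
      | cons ch t iht =>
        intro acc memo st hl
        simp only [pvCostListA, pvDepthListA]
        rw [pvL1]
        have h1 := ih ch memo st (hl ch (List.mem_cons_self))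
        have h2 := iht (max acc (pvDepthA rm f ch memo st).1)
          (pvDepthA rm f ch memo st).2.1 st
          (fun x hx => hl x (List.mem_cons_of_mem ch hx))
        simp only [List.length_cons]
        omega
    intro c memo st hc
    simp only [pvCostA, pvDepthA]
    cases hm : memo.get? c with
    | some v => simp
    | none =>
      simp only
      cases hst : PySem.Set.contains st c with
      | true => simp [hst]
      | false =>
        simp only [hst, Bool.false_eq_true, if_false]
        cases hch : rm.getD c [] with
        | nil =>
          simp only
          have := pvPhiInsert rm memo c 0 hc hm
          rw [hch] at this
          simp only [List.length_nil] at this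
          omega
        | cons ch t =>
          simp only
          rw [pvL1]
          have hchm : ch ∈ pvUD rm := pvChildMem (by rw [hch]; exact List.mem_cons_self)
          have htm : ∀ x ∈ t, x ∈ pvUD rm :=
            fun x hx => pvChildMem (by rw [hch]; exact List.mem_cons_of_mem ch hx)
          have h1 := ih ch memo (PySem.Set.add st c) hchm
          have h2 := ihl t (pvDepthA rm f ch memo (PySem.Set.add st c)).1
            (pvDepthA rm f ch memo (PySem.Set.add st c)).2.1 (PySem.Set.add st c) htm
          -- the key c is untouched during the children (it is on the stack), so still absent
          have hcin : PySem.Set.contains (PySem.Set.add st c) c = true :=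
            (pvContainsAdd st c c).mpr (Or.inr rfl)
          have hnoneN :
              ((pvDepthListA rm f t (pvDepthA rm f ch memo (PySem.Set.add st c)).1
                  (pvDepthA rm f ch memo (PySem.Set.add st c)).2.1 (PySem.Set.add st c)).2.1).get? c
                = none := by
            rw [pvDLAget2 _ _ _ _ _ _ _ hcin, pvL2 _ _ _ _ _ _ hcin, hm]
          have hins := pvPhiInsert rm
            (pvDepthListA rm f t (pvDepthA rm f ch memo (PySem.Set.add st c)).1
              (pvDepthA rm f ch memo (PySem.Set.add st c)).2.1 (PySem.Set.add st c)).2.1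
            c (1 + (pvDepthListA rm f t (pvDepthA rm f ch memo (PySem.Set.add st c)).1
              (pvDepthA rm f ch memo (PySem.Set.add st c)).2.1 (PySem.Set.add st c)).1)
            hc hnoneN
          rw [hch] at hins
          simp only [List.length_cons] at hins
          omega

-- ---- the simulation: one Enter frame behaves exactly like one _depth call ----
theorem pvSE (rm : PySem.Dict String (List String)) :
    ∀ fuel c memo st, c ∈ pvUD rm → pvCnt rm st < fuel →
      (∀ x, PySem.Set.contains st x = true → memo.get? x = none) →
      ((∀ (k : Nat) (fs : List (String × Bool)),
          pvRunB rm (pvCostA rm fuel c memo st + k) ((c, false) :: fs) memo st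
            = pvRunB rm k fs (pvDepthA rm fuel c memo st).2.1 st)
        ∧ (((pvDepthA rm fuel c memo st).2.1).get? c = some (pvDepthA rm fuel c memo st).1
            ∨ (PySem.Set.contains st c = true ∧ (pvDepthA rm fuel c memo st).1 = 0))) := by
  intro fuel
  induction fuel with
  | zero => intro c memo st _ hcnt _; exact absurd hcnt (Nat.not_lt_zero _)
  | succ f ih =>
    -- list version at fuel f, from the induction hypothesis
    have ihl : ∀ (l : List String) (acc : Int) memo st, (∀ ch ∈ l, ch ∈ pvUD rm) →
        pvCnt rm st < f →
        (∀ x, PySem.Set.contains st x = true → memo.get? x = none) →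
        ((∀ (k : Nat) (fs : List (String × Bool)),
            pvRunB rm (pvCostListA rm f l memo st + k)
                (l.map (fun ch => (ch, false)) ++ fs) memo st
              = pvRunB rm k fs (pvDepthListA rm f l acc memo st).2.1 st)
          ∧ (pvDepthListA rm f l acc memo st).1
              = l.foldl (fun a ch =>
                  max a (((pvDepthListA rm f l acc memo st).2.1).getD ch 0)) acc) := by
      intro l
      induction l with
      | nil =>
        intro acc memo st _ _ _
        constructor
        · intro k fs; simp [pvCostListA, pvDepthListA]
        · simp [pvDepthListA]
      | cons ch t iht =>
        intro acc memo st hl hcnt hdisj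
        have hhd := ih ch memo st (hl ch (List.mem_cons_self)) hcnt hdisj
        obtain ⟨hrunH, hvalH⟩ := hhd
        have hdisj1 : ∀ x, PySem.Set.contains st x = true →
            ((pvDepthA rm f ch memo st).2.1).get? x = none := by
          intro x hx
          rw [pvL2 _ _ _ _ _ _ hx]
          exact hdisj x hx
        have htl := iht (max acc (pvDepthA rm f ch memo st).1)
          (pvDepthA rm f ch memo st).2.1 st
          (fun x hx => hl x (List.mem_cons_of_mem ch hx)) hcnt hdisj1
        obtain ⟨hrunT, hfoldT⟩ := htl
        have hDL : pvDepthListA rm f (ch :: t) acc memo st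
            = pvDepthListA rm f t (max acc (pvDepthA rm f ch memo st).1)
                (pvDepthA rm f ch memo st).2.1 st := by
          simp only [pvDepthListA]
          rw [pvL1]
        have hgetd : ((pvDepthListA rm f t (max acc (pvDepthA rm f ch memo st).1)
              (pvDepthA rm f ch memo st).2.1 st).2.1).getD ch 0
            = (pvDepthA rm f ch memo st).1 := by
          rcases hvalH with hsome | ⟨hin, hzero⟩
          · rw [PySem.Dict.getD_eq_get?_getD, pvDLAget3 _ _ _ _ _ _ _ _ hsome]
            rfl
          · rw [PySem.Dict.getD_eq_get?_getD, pvDLAget2 _ _ _ _ _ _ _ hin,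
              pvL2 _ _ _ _ _ _ hin, hdisj ch hin, hzero]
            rfl
        constructor
        · intro k fs
          have hCL : pvCostListA rm f (ch :: t) memo st
              = pvCostA rm f ch memo st + pvCostListA rm f t (pvDepthA rm f ch memo st).2.1 st := by
            simp only [pvCostListA]
            rw [pvL1]
          rw [hCL, hDL, Nat.add_assoc, List.map_cons, List.cons_append]
          rw [hrunH, hrunT]
        · rw [hDL, List.foldl_cons, hgetd, hfoldT]
    -- entry version at fuel f+1
    intro c memo st hc hcnt hdisj
    cases hm : memo.get? c with
    | some v =>
      constructor
      · intro k fs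
        simp only [pvCostA, pvDepthA, hm]
        have hcont : memo.contains c = true := by
          rw [PySem.Dict.contains_eq_isSome_get?, hm]; rfl
        rw [Nat.add_comm 1 k]
        simp only [pvRunB, Bool.false_eq_true, if_false, hcont, Bool.true_or, if_true]
      · simp [pvDepthA, hm]
    | none =>
      have hcont : memo.contains c = false := by
        rw [PySem.Dict.contains_eq_isSome_get?, hm]; rfl
      cases hst : PySem.Set.contains st c with
      | true =>
        constructor
        · intro k fs
          simp only [pvCostA, pvDepthA, hm, hst, if_true]
          rw [Nat.add_comm 1 k]
          simp only [pvRunB, Bool.false_eq_true, if_false, hcont, hst, Bool.false_or, if_true]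
        · have hmem : c ∈ st := (pvContainsIff st c).mp hst
          simp [pvDepthA, hm, hst, hmem]
      | false =>
        have hcnt1 : pvCnt rm (PySem.Set.add st c) < f := by
          have := pvCntAdd rm hc hst
          omega
        have hdisj1 : ∀ x, PySem.Set.contains (PySem.Set.add st c) x = true →
            memo.get? x = none := by
          intro x hx
          rcases (pvContainsAdd st c x).mp hx with hxs | hxc
          · exact hdisj x (pvMemContains hxs)
          · rw [hxc]; exact hm
        cases hch : rm.getD c [] with
        | nil =>
          constructor
          · intro k fs
            simp only [pvCostA, pvDepthA, hm, hst, Bool.false_eq_true, if_false, hch]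
            have h2 : 2 + k = (1 + k) + 1 := by omega
            rw [h2]
            simp only [pvRunB, Bool.false_eq_true, if_false, hcont, hst, Bool.or_self, hch,
              List.map_nil, List.nil_append]
            rw [Nat.add_comm 1 k]
            simp only [pvRunB, if_true, hch]
            rw [pvDiscardAdd hst]
          · simp only [pvDepthA, hm, hst, Bool.false_eq_true, if_false, hch]
            exact Or.inl (PySem.Dict.get?_insert_self _ _ _)
        | cons ch t =>
          have hchm : ch ∈ pvUD rm := pvChildMem (by rw [hch]; exact List.mem_cons_self)
          have htm : ∀ x ∈ t, x ∈ pvUD rm :=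
            fun x hx => pvChildMem (by rw [hch]; exact List.mem_cons_of_mem ch hx)
          obtain ⟨hrunH, hvalH⟩ := ih ch memo (PySem.Set.add st c) hchm hcnt1 hdisj1
          have hdisj2 : ∀ x, PySem.Set.contains (PySem.Set.add st c) x = true →
              ((pvDepthA rm f ch memo (PySem.Set.add st c)).2.1).get? x = none := by
            intro x hx
            rw [pvL2 _ _ _ _ _ _ hx]
            exact hdisj1 x hx
          obtain ⟨hrunT, hfoldT⟩ := ihl t (pvDepthA rm f ch memo (PySem.Set.add st c)).1
            (pvDepthA rm f ch memo (PySem.Set.add st c)).2.1 (PySem.Set.add st c) htm hcnt1 hdisj2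
          have hgetd : ((pvDepthListA rm f t (pvDepthA rm f ch memo (PySem.Set.add st c)).1
                (pvDepthA rm f ch memo (PySem.Set.add st c)).2.1 (PySem.Set.add st c)).2.1).getD ch 0
              = (pvDepthA rm f ch memo (PySem.Set.add st c)).1 := by
            rcases hvalH with hsome | ⟨hin, hzero⟩
            · rw [PySem.Dict.getD_eq_get?_getD, pvDLAget3 _ _ _ _ _ _ _ _ hsome]
              rfl
            · rw [PySem.Dict.getD_eq_get?_getD, pvDLAget2 _ _ _ _ _ _ _ hin,
                pvL2 _ _ _ _ _ _ hin, hdisj1 ch hin, hzero]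
              rfl
          constructor
          · intro k fs
            simp only [pvCostA, pvDepthA, hm, hst, Bool.false_eq_true, if_false, hch]
            rw [pvL1]
            have harr : 2 + pvCostA rm f ch memo (PySem.Set.add st c)
                  + pvCostListA rm f t (pvDepthA rm f ch memo (PySem.Set.add st c)).2.1
                      (PySem.Set.add st c) + k
                = (pvCostA rm f ch memo (PySem.Set.add st c)
                    + (pvCostListA rm f t (pvDepthA rm f ch memo (PySem.Set.add st c)).2.1
                        (PySem.Set.add st c) + (1 + k))) + 1 := by omega
            rw [harr]
            simp only [pvRunB, Bool.false_eq_true, if_false, hcont, hst, Bool.or_self, hch,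
              List.map_cons, List.cons_append]
            rw [hrunH]
            rw [hrunT (1 + k) ((c, true) :: fs)]
            rw [Nat.add_comm 1 k]
            simp only [pvRunB, if_true, hch]
            rw [pvDiscardAdd hst, hgetd, ← hfoldT]
          · simp only [pvDepthA, hm, hst, Bool.false_eq_true, if_false, hch]
            rw [pvL1]
            exact Or.inl (PySem.Dict.get?_insert_self _ _ _)

-- ---- fuel-B is always enough for one top-level course ----
theorem pvCostLeFuelB (rm : PySem.Dict String (List String)) (c : String)
    (memo : PySem.Dict String Int) (hc : c ∈ pvUD rm) :
    pvCostA rm (pvFuelA rm) c memo PySem.Set.empty ≤ pvFuelB rm := by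
  have h1 := pvCBe rm (pvFuelA rm) c memo PySem.Set.empty hc
  have h2 : pvPhi rm memo ≤ pvPhi rm PySem.Dict.empty := by
    apply pvPhiMono
    intro x v hx
    rw [PySem.Dict.get?_empty] at hx
    cases hx
  have h3 : pvPhi rm PySem.Dict.empty + 1 ≤ pvFuelB rm := by
    unfold pvPhi pvFuelB
    rw [PySem.List.foldl_add_nat]
    have hfil : ((pvUD rm).filter (fun u => ((PySem.Dict.empty : PySem.Dict String Int).get? u).isNone))
        = pvUD rm := by
      apply List.filter_eq_self.mpr
      intro u _
      simp [PySem.Dict.get?_empty]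
    rw [hfil]
    have hsub := (pvDedupSublist (rm.keys ++ rm.values.flatten)).map
      (fun u => (rm.getD u []).length + 2)
    have := hsub.sum_le_sum (by simp)
    unfold pvUD
    omega
  omega

theorem pvCntEmptyLt (rm : PySem.Dict String (List String)) :
    pvCnt rm PySem.Set.empty < pvFuelA rm := by
  unfold pvCnt pvFuelA
  have hfil : ((pvUD rm).filter (fun x => !PySem.Set.contains PySem.Set.empty x))
      = pvUD rm := by
    apply List.filter_eq_self.mpr
    intro u _
    rw [pvContainsEmpty]
    rfl
  rw [hfil]
  have := (pvDedupSublist (rm.keys ++ rm.values.flatten)).length_le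
  unfold pvUD
  omega

theorem pvStep (rm : PySem.Dict String (List String)) (c : String)
    (memo : PySem.Dict String Int) (hc : c ∈ rm.keys) :
    pvRunB rm (pvFuelB rm) [(c, false)] memo PySem.Set.empty
      = ((pvDepthA rm (pvFuelA rm) c memo PySem.Set.empty).2.1, PySem.Set.empty) := by
  have hcU : c ∈ pvUD rm := pvKeyMem hc
  have hdisj : ∀ x, PySem.Set.contains (PySem.Set.empty : PySem.Set String) x = true →
      memo.get? x = none := by
    intro x hx
    rw [pvContainsEmpty] at hx
    cases hx
  obtain ⟨hrun, _⟩ := pvSE rm (pvFuelA rm) c memo PySem.Set.empty hcU (pvCntEmptyLt rm) hdisj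
  have hcost := pvCostLeFuelB rm c memo hcU
  have hsplit : pvFuelB rm
      = pvCostA rm (pvFuelA rm) c memo PySem.Set.empty
        + (pvFuelB rm - pvCostA rm (pvFuelA rm) c memo PySem.Set.empty) := by omega
  rw [hsplit, hrun]
  cases h : pvFuelB rm - pvCostA rm (pvFuelA rm) c memo PySem.Set.empty with
  | zero => simp [pvRunB]
  | succ n => simp [pvRunB]

theorem pvTop (rm : PySem.Dict String (List String)) :
    ∀ ks : List String, (∀ c ∈ ks, c ∈ rm.keys) →
      ∀ memo : PySem.Dict String Int,
        ks.foldl (fun (s : PySem.Dict String Int × PySem.Set String) course =>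
            (pvDepthA rm (pvFuelA rm) course s.1 s.2).2) (memo, PySem.Set.empty)
          = ks.foldl (fun (s : PySem.Dict String Int × PySem.Set String) course =>
              pvRunB rm (pvFuelB rm) [(course, false)] s.1 s.2) (memo, PySem.Set.empty) := by
  intro ks
  induction ks with
  | nil => intro _ memo; rfl
  | cons c t ih =>
    intro h memo
    simp only [List.foldl_cons]
    have hA2 : (pvDepthA rm (pvFuelA rm) c memo PySem.Set.empty).2
        = ((pvDepthA rm (pvFuelA rm) c memo PySem.Set.empty).2.1, PySem.Set.empty) := by
      have := pvL1 rm (pvFuelA rm) c memo PySem.Set.empty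
      exact Prod.ext rfl this
    rw [hA2, pvStep rm c memo (h c (List.mem_cons_self)),
      ih (fun x hx => h x (List.mem_cons_of_mem c hx))]

-- ===== VERDICT (by name: the statement is the Claim_ definition above) =====
theorem compute_chain_depths_spec : Claim_equal_compute_chain_depths := by
  intro reverse_map _hdom
  unfold Spec_compute_chain_depths
  simp only [compute_chain_depths, compute_chain_depths_alt]
  rw [pvTop (PySem.Dict.ofList reverse_map) (PySem.Dict.ofList reverse_map).keys
    (fun c hc => hc) PySem.Dict.empty]
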